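-- pv_equiv track=rewrite | github.com/raja3233/foobar | mad_science_quarterly.py | getPositiveIntCount
-- ===== SOURCE A (Python) =====
-- def getPositiveIntCount(list):
--     n = len(list)
--     if n == 1:
--         if list[0] > 0:
--             return 1
--         else:
--             return 0
--     mid = n >> 1
--     if list[mid] > 0:
--         return mid + getPositiveIntCount(list[mid:])
--     else:
--         return getPositiveIntCount(list[:mid])
-- ===== SOURCE B (Python) =====
-- def getPositiveIntCount(list):
--     lo, hi = 0, len(list)
--     acc = 0
--     while hi - lo != 1:
--         mid = (hi - lo) >> 1
--         if list[lo + mid] > 0: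
--             acc += mid
--             lo += mid
--         else:
--             hi = lo + mid
--     return acc + (1 if list[lo] > 0 else 0)
-- ===== Notes on version B (the rewrite author's own statement) =====
-- stated objective: alternative
-- what changed: Replaced A's recursion that copies a slice of the list at every step with a single iterative loop over (lo, hi) index bounds and an accumulator, probing the same midpoints without building sublists; intended as faster, but a timing run measured only 1.26x at the largest size, so no speed is claimed.
import Mathlib
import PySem

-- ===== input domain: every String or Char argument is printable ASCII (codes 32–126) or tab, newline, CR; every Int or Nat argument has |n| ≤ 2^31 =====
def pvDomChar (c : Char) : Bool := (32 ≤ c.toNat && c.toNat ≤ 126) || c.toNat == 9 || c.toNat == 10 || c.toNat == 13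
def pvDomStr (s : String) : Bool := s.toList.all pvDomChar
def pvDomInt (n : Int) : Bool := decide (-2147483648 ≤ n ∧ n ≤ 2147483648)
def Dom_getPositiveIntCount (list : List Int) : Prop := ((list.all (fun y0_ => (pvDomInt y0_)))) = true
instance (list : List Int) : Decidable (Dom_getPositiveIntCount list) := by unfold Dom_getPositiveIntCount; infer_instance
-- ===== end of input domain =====

-- B replaces A's slice-copying recursion by an iterative (lo, hi)-index loop with an
-- accumulator: same probe sequence, no sublist copies (objective: alternative).


-- ===== PORT A =====
-- literal port of A: n = len(list); if n == 1 return [list[0] > 0]; mid = n >> 1;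
-- recurse on the slice list[mid:] (adding mid) or list[:mid].
-- pyGet? returning none is Python's IndexError (reached only for the empty list, excluded by Pre_).
def getPositiveIntCount (list : List Int) : Int :=
  let n : Int := list.length
  if n = 1 then
    match PySem.List.pyGet? list 0 with
    | some x => if x > 0 then 1 else 0
    | none => 0
  else
    let mid : Int := n >>> (1 : Nat)
    match hx : PySem.List.pyGet? list mid with
    | some x =>
        if x > 0 then
          mid + getPositiveIntCount (PySem.List.slice list (some mid) none)
        else
          getPositiveIntCount (PySem.List.slice list none (some mid))
    | none => 0
termination_by list.length
decreasing_by
  · -- list[mid:] : list is nonempty (pyGet? succeeded), mid = len/2 ≥ 1 since len ≠ 1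
    have hir : PySem.Raise.InRange list.length mid := by
      by_contra hc
      rw [(PySem.List.pyGet?_eq_none_iff list mid).mpr hc] at hx
      simp at hx
    have hlen : 2 ≤ list.length := by
      rcases hir with ⟨h1, h2⟩
      simp only [n] at *
      omega
    have hmid : ((list.length : Int) >>> (1:Nat)) = ((list.length / 2 : Nat) : Int) := by
      have h2 : list.length >>> 1 = list.length / 2 := by omega
      exact h2 ▸ (rfl : ((list.length : Int) >>> (1:Nat)) = ((list.length >>> 1 : Nat) : Int))
    rw [hmid, PySem.List.slice_from_natCast]
    simp only [List.length_drop]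
    omega
  · -- list[:mid]
    have hir : PySem.Raise.InRange list.length mid := by
      by_contra hc
      rw [(PySem.List.pyGet?_eq_none_iff list mid).mpr hc] at hx
      simp at hx
    have hlen : 2 ≤ list.length := by
      rcases hir with ⟨h1, h2⟩
      simp only [n] at *
      omega
    have hmid : ((list.length : Int) >>> (1:Nat)) = ((list.length / 2 : Nat) : Int) := by
      have h2 : list.length >>> 1 = list.length / 2 := by omega
      exact h2 ▸ (rfl : ((list.length : Int) >>> (1:Nat)) = ((list.length >>> 1 : Nat) : Int))
    rw [hmid, PySem.List.slice_to_natCast]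
    simp only [List.length_take]
    omega

-- ===== PORT B =====
-- literal port of Source B's while-loop: state (lo, hi, acc); the 'hi ≤ lo' guard only makes the
-- recursion total (Python reaches that state only for the empty input, where it raises; excluded by Pre_).
def pvAltGo (l : List Int) (lo hi : Nat) (acc : Int) : Int :=
  if hi ≤ lo then acc
  else if hi - lo = 1 then
    match PySem.List.pyGet? l (lo : Int) with
    | some x => acc + (if x > 0 then 1 else 0)
    | none => acc
  else
    let mid : Nat := (hi - lo) >>> 1
    match PySem.List.pyGet? l ((lo + mid : Nat) : Int) with
    | some x =>
        if x > 0 then pvAltGo l (lo + mid) hi (acc + (mid : Int))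
        else pvAltGo l lo (lo + mid) acc
    | none => acc
termination_by hi - lo
decreasing_by
  · simp only [Nat.shiftRight_eq_div_pow, pow_one] at *; omega
  · simp only [Nat.shiftRight_eq_div_pow, pow_one] at *; omega

def getPositiveIntCount_alt (list : List Int) : Int :=
  pvAltGo list 0 list.length 0

-- ===== PRECONDITION & SPEC =====
-- Pre_ excludes exactly the empty list, on which A (and B) raise IndexError.
def Pre_getPositiveIntCount (list : List Int) : Prop := list ≠ []
instance (list : List Int) : Decidable (Pre_getPositiveIntCount list) := by unfold Pre_getPositiveIntCount; infer_instance
def pvWitness_getPositiveIntCount : List Int := [3, 1, -2]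

def Spec_getPositiveIntCount (list : List Int) (out : Int) : Prop := out = getPositiveIntCount_alt list
instance (list : List Int) (out : Int) : Decidable (Spec_getPositiveIntCount list out) := by unfold Spec_getPositiveIntCount; infer_instance

-- ===== CLAIM (what is proved, stated in full; the proofs are below) =====
def Claim_equal_getPositiveIntCount : Prop := ∀ (list : List Int), Dom_getPositiveIntCount list → Pre_getPositiveIntCount list → Spec_getPositiveIntCount list (getPositiveIntCount list)

-- ===== LEMMAS AND PROOFS =====

-- A on the window (l.drop lo).take (hi - lo) is what the loop state (lo, hi, acc) computes, minus acc.
theorem pvAltGo_eq (l : List Int) : ∀ (d lo hi : Nat) (acc : Int), hi - lo = d → lo < hi → hi ≤ l.length →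
    pvAltGo l lo hi acc = acc + getPositiveIntCount ((l.drop lo).take (hi - lo)) := by
  intro d
  induction d using Nat.strong_induction_on with
  | _ d ih =>
    intro lo hi acc hd hlt hle
    have hsublen : ((l.drop lo).take (hi - lo)).length = hi - lo := by
      simp only [List.length_take, List.length_drop]; omega
    by_cases h1 : hi - lo = 1
    · -- window of length 1
      have hlo : lo < l.length := by omega
      have hgetB : PySem.List.pyGet? l (lo : Int) = some (l[lo]'hlo) := by
        rw [PySem.List.pyGet?_natCast, List.getElem?_eq_getElem hlo]
      have hget0 : PySem.List.pyGet? ((l.drop lo).take (hi - lo)) 0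
          = some (l[lo]'hlo) := by
        have h := PySem.List.pyGet?_natCast ((l.drop lo).take (hi - lo)) 0
        simp only [Nat.cast_zero] at h
        rw [h, List.getElem?_eq_getElem (by omega)]
        simp [List.getElem_take, List.getElem_drop]
      rw [pvAltGo, if_neg (by omega), if_pos h1]
      rw [getPositiveIntCount]
      rw [if_pos (by simp only [List.length_take, List.length_drop]; omega)]
      rw [hgetB, hget0]
    · -- window of length ≥ 2
      have hd2 : 2 ≤ hi - lo := by omega
      set m : Nat := (hi - lo) / 2 with hm
      have hm1 : 1 ≤ m := by omega
      have hmlt : m < hi - lo := by omega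
      have hlomid : lo + m < l.length := by omega
      have hgetB : PySem.List.pyGet? l ((lo + m : Nat) : Int) = some (l[lo + m]'hlomid) := by
        rw [PySem.List.pyGet?_natCast, List.getElem?_eq_getElem hlomid]
      have hmidB : (hi - lo) >>> 1 = m := by omega
      -- B side: one loop step
      have hB : pvAltGo l lo hi acc
          = if (l[lo + m]'hlomid) > 0 then pvAltGo l (lo + m) hi (acc + (m : Int))
            else pvAltGo l lo (lo + m) acc := by
        rw [pvAltGo, if_neg (by omega), if_neg h1]
        simp only [hmidB, hgetB]
      -- A side: one unfolding on the window
      have hmidA : ((((l.drop lo).take (hi - lo)).length : Int)) >>> (1 : Nat) = ((m : Nat) : Int) := by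
        rw [hsublen]
        have h2 : (hi - lo) >>> 1 = m := hmidB
        exact h2 ▸ (rfl : (((hi - lo : Nat) : Int) >>> (1:Nat)) = (((hi - lo) >>> 1 : Nat) : Int))
      have hgetA : PySem.List.pyGet? ((l.drop lo).take (hi - lo)) ((m : Nat) : Int)
          = some (l[lo + m]'hlomid) := by
        rw [PySem.List.pyGet?_natCast]
        rw [List.getElem?_eq_getElem (by omega)]
        congr 1
        simp [List.getElem_take, List.getElem_drop]
      have hA : getPositiveIntCount ((l.drop lo).take (hi - lo))
          = if (l[lo + m]'hlomid) > 0 then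
              (m : Int) + getPositiveIntCount (PySem.List.slice ((l.drop lo).take (hi - lo)) (some ((m : Nat) : Int)) none)
            else
              getPositiveIntCount (PySem.List.slice ((l.drop lo).take (hi - lo)) none (some ((m : Nat) : Int))) := by
        rw [getPositiveIntCount]
        rw [if_neg (by rw [hsublen]; exact_mod_cast fun h => h1 (by exact_mod_cast h))]
        simp only [hmidA]
        split
        · rename_i x heq
          rw [hmidA, hgetA] at heq
          injection heq with h
          subst h
          rfl
        · rename_i heq
          rw [hmidA, hgetA] at heq
          simp at heq
      rw [hB, hA]
      split
      · -- positive probe: A recurses on window[m:], B moves lo to lo+m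
        rw [PySem.List.slice_from_natCast, List.drop_take, List.drop_drop]
        have harith : hi - lo - m = hi - (lo + m) := by omega
        rw [harith]
        rw [ih (hi - (lo + m)) (by omega) (lo + m) hi (acc + (m : Int)) rfl (by omega) hle]
        ring
      · -- nonpositive probe: A recurses on window[:m], B moves hi to lo+m
        rw [PySem.List.slice_to_natCast, List.take_take]
        have hmin : min m (hi - lo) = m := by omega
        rw [hmin]
        rw [ih m (by omega) lo (lo + m) acc (by omega) (by omega) (by omega)]
        have h2 : lo + m - lo = m := by omega
        rw [h2]

-- ===== VERDICT (by name: the statement is the Claim_ definition above) =====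
theorem getPositiveIntCount_spec : Claim_equal_getPositiveIntCount := by
  intro list _ hpre
  unfold Spec_getPositiveIntCount getPositiveIntCount_alt
  have hlen : 0 < list.length := List.length_pos_iff.mpr hpre
  rw [pvAltGo_eq list list.length 0 list.length 0 (by omega) hlen (le_refl _)]
  simp
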